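-- pv_equiv track=rewrite | github.com/midoks/mdserver-web | class/core/mw.py | get_string_arr
-- ===== SOURCE A (Python) =====
-- def get_string(t):
--     if t != -1:
--         max = 126
--         m_types = [{'m': 122, 'n': 97}, {'m': 90, 'n': 65}, {'m': 57, 'n': 48}, {
--             'm': 47, 'n': 32}, {'m': 64, 'n': 58}, {'m': 96, 'n': 91}, {'m': 125, 'n': 123}]
--     else:
--         max = 256
--         t = 0
--         m_types = [{'m': 255, 'n': 0}]
--     arr = []
--     for i in range(max):
--         if i < m_types[t]['n'] or i > m_types[t]['m']:
--             continue
--         arr.append(chr(i))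
--     return arr
--
-- def get_string_arr(t):
--     s_arr = {}
--     t_arr = []
--     for s1 in t:
--         for i in range(6):
--             if not i in s_arr:
--                 s_arr[i] = get_string(i)
--             for j in range(len(s_arr[i])):
--                 if s1 == s_arr[i][j]:
--                     t_arr.append(str(i) + str(j))
--     return t_arr
-- ===== SOURCE B (Python) =====
-- def get_string_arr(t):
--     bounds = [(97, 122), (65, 90), (48, 57), (32, 47), (58, 64), (91, 96)]
--     res = []
--     for ch in t:
--         o = ord(ch)
--         for k, (n, m) in enumerate(bounds):
--             if n <= o <= m:
--                 res.append(str(k) + str(o - n))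
--                 break
--     return res
-- ===== Notes on version B (the rewrite author's own statement) =====
-- stated objective: faster
-- what changed: B drops A's per-character rebuild of the cached category tables and the nested index scan; it computes category and offset directly from ord(ch) against six (low,high) bounds pairs, emitting str(k)+str(o-n).
import Mathlib
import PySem

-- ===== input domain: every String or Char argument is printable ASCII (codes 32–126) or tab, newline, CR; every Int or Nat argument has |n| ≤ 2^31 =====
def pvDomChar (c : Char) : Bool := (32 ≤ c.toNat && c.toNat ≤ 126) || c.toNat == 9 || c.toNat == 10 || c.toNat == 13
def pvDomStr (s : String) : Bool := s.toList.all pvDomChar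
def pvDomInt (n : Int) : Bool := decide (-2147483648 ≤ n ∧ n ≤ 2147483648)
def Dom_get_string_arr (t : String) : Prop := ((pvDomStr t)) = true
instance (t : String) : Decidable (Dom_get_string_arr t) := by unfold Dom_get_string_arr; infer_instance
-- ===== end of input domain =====

-- B replaces A's per-char rebuild-the-category-list-and-inner-scan with direct range
-- arithmetic on the char code (first matching bounds pair, emit str(k)+str(o-n)); objective: simpler.

-- ===== PORT A =====
-- helper: Python get_string(t); the 'none' branch of the index lookup is where Python
-- would raise IndexError (never reached for the calls get_string_arr makes, t ∈ 0..5).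
def get_string (t : Int) : List String :=
  let cfg : Int × Int × List (Int × Int) :=
    if t ≠ -1 then
      (126, t, [(122, 97), (90, 65), (57, 48), (47, 32), (64, 58), (96, 91), (125, 123)])
    else
      (256, 0, [(255, 0)])
  (PySem.List.pyRange 0 cfg.1 1).foldl (fun arr i =>
    match PySem.List.pyGet? cfg.2.2 cfg.2.1 with
    | some mn => if i < mn.2 ∨ i > mn.1 then arr else arr ++ [String.ofList [Char.ofNat i.toNat]]
    | none => arr) []

def get_string_arr (t : String) : List String :=
  (t.toList.foldl (fun (st : PySem.Dict Int (List String) × List String) s1 =>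
    (PySem.List.pyRange 0 6 1).foldl (fun st i =>
      let s_arr := if st.1.contains i then st.1 else st.1.insert i (get_string i)
      let lst := s_arr.getD i []
      let t_arr := (PySem.List.pyRange 0 lst.length 1).foldl (fun t_arr j =>
        if String.ofList [s1] == PySem.List.pyGetD lst j "" then
          t_arr ++ [PySem.Int.toStr i ++ PySem.Int.toStr j]
        else t_arr) st.2
      (s_arr, t_arr)) st)
    (PySem.Dict.empty, [])).2

-- ===== PORT B =====
-- helper: first bounds pair (n,m) with n ≤ o ≤ m, returned as (index, o - n);
-- Python's enumerate loop with break.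
def pvFindCat : List (Int × Int) → Int → Int → Option (Int × Int)
  | [], _, _ => none
  | (n, m) :: rest, o, k =>
    if n ≤ o ∧ o ≤ m then some (k, o - n) else pvFindCat rest o (k + 1)

def pvBounds : List (Int × Int) :=
  [(97, 122), (65, 90), (48, 57), (32, 47), (58, 64), (91, 96)]

def get_string_arr_alt (t : String) : List String :=
  t.toList.foldl (fun res ch =>
    match pvFindCat pvBounds (ch.toNat : Int) 0 with
    | some (k, off) => res ++ [PySem.Int.toStr k ++ PySem.Int.toStr off]
    | none => res) []

-- ===== PRECONDITION & SPEC =====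
def Spec_get_string_arr (t : String) (out : List String) : Prop := out = get_string_arr_alt t
instance (t : String) (out : List String) : Decidable (Spec_get_string_arr t out) := by unfold Spec_get_string_arr; infer_instance

-- ===== CLAIM (what is proved, stated in full; the proofs are below) =====
def Claim_equal_get_string_arr : Prop := ∀ (t : String), Dom_get_string_arr t → Spec_get_string_arr t (get_string_arr t)

-- ===== LEMMAS AND PROOFS =====

-- the strings A's inner j-loop appends for char c and category i
def pvHInner (c : Char) (i : Int) : List String :=
  ((PySem.List.pyRange 0 (get_string i).length 1).filter
    (fun j => String.ofList [c] == PySem.List.pyGetD (get_string i) j "")).map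
    (fun j => PySem.Int.toStr i ++ PySem.Int.toStr j)

-- per-char output of A (dict-free)
def pvGA (c : Char) : List String := (PySem.List.pyRange 0 6 1).flatMap (pvHInner c)

-- per-char output of B
def pvGB (c : Char) : List String :=
  match pvFindCat pvBounds (c.toNat : Int) 0 with
  | some (k, off) => [PySem.Int.toStr k ++ PySem.Int.toStr off]
  | none => []

-- dict invariant: every cached entry is the true category table
def pvInv (d : PySem.Dict Int (List String)) : Prop :=
  ∀ i v, d.get? i = some v → v = get_string i

theorem pvInner_of_inv (d : PySem.Dict Int (List String)) (hd : pvInv d) (i : Int) :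
    ((if d.contains i then d else d.insert i (get_string i)).getD i []) = get_string i ∧
    pvInv (if d.contains i then d else d.insert i (get_string i)) := by
  by_cases h : d.contains i = true
  · simp only [h, if_true]
    refine ⟨?_, hd⟩
    rw [PySem.Dict.contains_eq_isSome_get?] at h
    obtain ⟨v, hv⟩ := Option.isSome_iff_exists.mp h
    rw [PySem.Dict.getD_eq_get?_getD, hv, hd i v hv]; rfl
  · simp only [h, if_false, Bool.false_eq_true]
    refine ⟨?_, ?_⟩
    · rw [PySem.Dict.getD_eq_get?_getD, PySem.Dict.get?_insert_self]; rfl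
    · intro j v hv
      by_cases hji : j = i
      · subst hji; rw [PySem.Dict.get?_insert_self] at hv
        exact (Option.some.inj hv).symm
      · exact hd j v (by rwa [PySem.Dict.get?_insert_of_ne _ _ hji] at hv)

-- A's i-loop for one char, from any invariant dict, appends the dict-free per-category strings
theorem pvStepA (c : Char) (is : List Int) (d : PySem.Dict Int (List String)) (hd : pvInv d)
    (acc : List String) :
    (is.foldl (fun (st : PySem.Dict Int (List String) × List String) i =>
      let s_arr := if st.1.contains i then st.1 else st.1.insert i (get_string i)
      let lst := s_arr.getD i []
      let t_arr := (PySem.List.pyRange 0 lst.length 1).foldl (fun t_arr j =>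
        if String.ofList [c] == PySem.List.pyGetD lst j "" then
          t_arr ++ [PySem.Int.toStr i ++ PySem.Int.toStr j]
        else t_arr) st.2
      (s_arr, t_arr)) (d, acc)).2 = acc ++ is.flatMap (pvHInner c) ∧
    pvInv (is.foldl (fun (st : PySem.Dict Int (List String) × List String) i =>
      let s_arr := if st.1.contains i then st.1 else st.1.insert i (get_string i)
      let lst := s_arr.getD i []
      let t_arr := (PySem.List.pyRange 0 lst.length 1).foldl (fun t_arr j =>
        if String.ofList [c] == PySem.List.pyGetD lst j "" then
          t_arr ++ [PySem.Int.toStr i ++ PySem.Int.toStr j]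
        else t_arr) st.2
      (s_arr, t_arr)) (d, acc)).1 := by
  induction is generalizing d acc with
  | nil => simpa using hd
  | cons i is ih =>
    obtain ⟨h1, h2⟩ := pvInner_of_inv d hd i
    simp only [List.foldl_cons, List.flatMap_cons, h1]
    rw [PySem.List.foldl_append_if]
    have := ih _ h2 (acc ++ pvHInner c i)
    rw [List.append_assoc] at this
    exact this

-- A's whole loop is a flatMap of the per-char output
theorem pvA_flat (cs : List Char) (d : PySem.Dict Int (List String)) (hd : pvInv d)
    (acc : List String) :
    (cs.foldl (fun (st : PySem.Dict Int (List String) × List String) s1 =>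
      (PySem.List.pyRange 0 6 1).foldl (fun st i =>
        let s_arr := if st.1.contains i then st.1 else st.1.insert i (get_string i)
        let lst := s_arr.getD i []
        let t_arr := (PySem.List.pyRange 0 lst.length 1).foldl (fun t_arr j =>
          if String.ofList [s1] == PySem.List.pyGetD lst j "" then
            t_arr ++ [PySem.Int.toStr i ++ PySem.Int.toStr j]
          else t_arr) st.2
        (s_arr, t_arr)) st) (d, acc)).2 = acc ++ cs.flatMap pvGA := by
  induction cs generalizing d acc with
  | nil => simp
  | cons c cs ih =>
    simp only [List.foldl_cons, List.flatMap_cons]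
    obtain ⟨h1, h2⟩ := pvStepA c (PySem.List.pyRange 0 6 1) d hd acc
    -- the state after processing c
    generalize hst : (PySem.List.pyRange 0 6 1).foldl _ (d, acc) = st at *
    have hpair : st = (st.1, st.2) := rfl
    rw [hpair, ih st.1 h2 st.2, h1, pvGA, List.append_assoc]

-- B's loop is a flatMap of the per-char output
theorem pvB_flat (cs : List Char) (acc : List String) :
    (cs.foldl (fun res ch =>
      match pvFindCat pvBounds (ch.toNat : Int) 0 with
      | some (k, off) => res ++ [PySem.Int.toStr k ++ PySem.Int.toStr off]
      | none => res) acc) = acc ++ cs.flatMap pvGB := by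
  induction cs generalizing acc with
  | nil => simp
  | cons c cs ih =>
    simp only [List.foldl_cons, List.flatMap_cons]
    rw [ih]
    unfold pvGB
    cases h : pvFindCat pvBounds (c.toNat : Int) 0 with
    | none => simp
    | some p => cases p; simp

-- per-char agreement on the domain's characters (all have codes < 127)
set_option maxRecDepth 100000 in
theorem pvGA_eq_pvGB (c : Char) (hc : pvDomChar c = true) : pvGA c = pvGB c := by
  have h127 : c.toNat < 127 := by
    simp only [pvDomChar, Bool.or_eq_true, Bool.and_eq_true, decide_eq_true_iff,
      beq_iff_eq] at hc
    omega
  have key : ∀ n : Nat, n < 127 → pvGA (Char.ofNat n) = pvGB (Char.ofNat n) := by decide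
  have := key c.toNat h127
  rwa [Char.ofNat_toNat] at this

-- ===== VERDICT (by name: the statement is the Claim_ definition above) =====
theorem get_string_arr_spec : Claim_equal_get_string_arr := by
  intro t ht
  unfold Spec_get_string_arr get_string_arr get_string_arr_alt
  have hinv : pvInv PySem.Dict.empty := by
    intro i v hv
    rw [PySem.Dict.get?_empty] at hv
    cases hv
  rw [pvA_flat t.toList PySem.Dict.empty hinv [], pvB_flat t.toList []]
  simp only [List.nil_append]
  refine List.flatMap_congr ?_
  intro c hc
  exact pvGA_eq_pvGB c (List.all_eq_true.mp ht c hc)
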